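-- pv_equiv track=rewrite | github.com/henrywelsh/daily_coding_problems | problems251_300/problem266.py | find_valid_step_words
-- ===== SOURCE A (Python) =====
-- def find_valid_step_words(valid_words, input_word : str):
--     def is_anagram(word1, word2):
--         return sorted(word1) == sorted(word2)
--
--     input_word = input_word.lower()
--     step_words = set()
--
--
--     for letter in "abcdefghijklmnopqrstuvwxyz":
--         new_word = input_word + letter
--         for word in valid_words:
--             if is_anagram(new_word, word):
--                 step_words.add(word)
--
--     return step_words
-- ===== SOURCE B (Python) =====
-- def find_valid_step_words(valid_words, input_word: str):
--     # Index valid words by their sorted-letter signature once, then do 26 lookups.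
--     index = {}
--     for word in valid_words:
--         index[''.join(sorted(word))] = index.get(''.join(sorted(word)), []) + [word]
--     base = input_word.lower()
--     step_words = set()
--     for letter in "abcdefghijklmnopqrstuvwxyz":
--         for word in index.get(''.join(sorted(base + letter)), []):
--             step_words.add(word)
--     return step_words
-- ===== Notes on version B (the rewrite author's own statement) =====
-- stated objective: faster
-- what changed: B builds a dict from sorted-letter signature to the matching words in one pass over valid_words, then does 26 signature lookups, instead of A's 26 full anagram scans of valid_words.
import Mathlib
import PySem

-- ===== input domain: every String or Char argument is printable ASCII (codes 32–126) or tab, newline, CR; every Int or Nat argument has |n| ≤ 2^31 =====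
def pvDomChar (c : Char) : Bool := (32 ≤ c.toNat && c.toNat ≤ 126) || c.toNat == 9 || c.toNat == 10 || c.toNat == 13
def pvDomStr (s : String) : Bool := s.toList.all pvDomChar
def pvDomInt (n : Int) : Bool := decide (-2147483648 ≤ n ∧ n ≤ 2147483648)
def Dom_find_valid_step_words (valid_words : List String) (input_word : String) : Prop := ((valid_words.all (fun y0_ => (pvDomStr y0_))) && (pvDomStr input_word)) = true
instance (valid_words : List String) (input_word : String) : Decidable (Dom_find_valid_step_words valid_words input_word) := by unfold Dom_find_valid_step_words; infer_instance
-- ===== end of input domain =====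

-- B: index valid_words by sorted-letter signature once, then 26 lookups (faster; return value only — equivalence is about the returned set, in identical insertion order).

-- ===== PORT A =====
def pvLetters : List Char := "abcdefghijklmnopqrstuvwxyz".toList

def find_valid_step_words (valid_words : List String) (input_word : String) : List String :=
  let input_word' := (PySem.Str.lower input_word).toList
  pvLetters.foldl (fun step_words letter =>
    let new_word := input_word' ++ [letter]
    valid_words.foldl (fun sw word =>
      if PySem.List.sorted new_word (fun c => c) false
           == PySem.List.sorted word.toList (fun c => c) false
      then PySem.Set.add sw word else sw) step_words) PySem.Set.empty

-- ===== PORT B =====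
def pvLettersB : List Char := "abcdefghijklmnopqrstuvwxyz".toList

-- ''.join(sorted(w)) as its character list (join of chars is the identity on content)
def pvSig (w : List Char) : List Char := PySem.List.sorted w (fun c => c) false

def find_valid_step_words_alt (valid_words : List String) (input_word : String) : List String :=
  let index : PySem.Dict (List Char) (List String) :=
    valid_words.foldl (fun d word => d.modify (pvSig word.toList) [] (· ++ [word])) PySem.Dict.empty
  let base := (PySem.Str.lower input_word).toList
  pvLettersB.foldl (fun sw letter =>
    (index.getD (pvSig (base ++ [letter])) []).foldl PySem.Set.add sw) PySem.Set.empty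

-- ===== PRECONDITION & SPEC =====
def Spec_find_valid_step_words (valid_words : List String) (input_word : String) (out : List String) : Prop := out = find_valid_step_words_alt valid_words input_word
instance (valid_words : List String) (input_word : String) (out : List String) : Decidable (Spec_find_valid_step_words valid_words input_word out) := by unfold Spec_find_valid_step_words; infer_instance

-- ===== CLAIM (what is proved, stated in full; the proofs are below) =====
def Claim_equal_find_valid_step_words : Prop := ∀ (valid_words : List String) (input_word : String), Dom_find_valid_step_words valid_words input_word → Spec_find_valid_step_words valid_words input_word (find_valid_step_words valid_words input_word)

-- ===== LEMMAS AND PROOFS =====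

-- The bucket stored under key c is exactly the sublist of words whose signature is c.
theorem pv_bucket (valid_words : List String) (c : List Char) :
    (valid_words.foldl (fun d word => d.modify (pvSig word.toList) [] (· ++ [word]))
        (PySem.Dict.empty : PySem.Dict (List Char) (List String))).getD c []
      = valid_words.filter (fun w => pvSig w.toList == c) := by
  have h := PySem.Dict.getD_foldl_modify_append
      (l := valid_words.map (fun w => (pvSig w.toList, w)))
      (d := (PySem.Dict.empty : PySem.Dict (List Char) (List String))) (c := c)
  simp only [List.foldl_map] at h
  rw [h]
  rw [List.filter_map, List.map_map]
  simp [Function.comp_def]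

-- 'for w in l: if p w: s.add(w)' = fold add over the filtered list.
theorem pv_fold_filter (p : String → Bool) (l : List String) (s : PySem.Set String) :
    l.foldl (fun sw w => if p w then PySem.Set.add sw w else sw) s
      = (l.filter p).foldl PySem.Set.add s := by
  induction l generalizing s with
  | nil => rfl
  | cons hd tl ih =>
    by_cases h : p hd = true <;> simp [h, ih]


-- ===== VERDICT (by name: the statement is the Claim_ definition above) =====
theorem find_valid_step_words_spec : Claim_equal_find_valid_step_words := by
  intro valid_words input_word _
  unfold Spec_find_valid_step_words find_valid_step_words find_valid_step_words_alt
  simp only []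
  have hL : pvLetters = pvLettersB := rfl
  rw [hL]
  congr 1
  funext sw letter
  rw [pv_bucket, pv_fold_filter]
  congr 1
  apply List.filter_congr
  intro w _
  simp [pvSig, eq_comm]
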